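-- pv_equiv track=rewrite | github.com/irgimondo/Tubes3_atsTracker | seeding_db_cipher.py | decrypt_numeric_string
-- ===== SOURCE A (Python) =====
-- def decrypt_numeric_string(encrypted_text: str, key: int) -> str:
--     decrypted_chars = []
--     for char in encrypted_text:
--         if char.isdigit():
--             original_digit = (int(char) - key + 10) % 10
--             decrypted_chars.append(str(original_digit))
--         else:
--             decrypted_chars.append(char)
--     return "".join(decrypted_chars)
-- ===== SOURCE B (Python) =====
-- def decrypt_numeric_string(encrypted_text: str, key: int) -> str:
--     # A shift by key on the digit alphabet is the (key % 10)-fold composition of the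
--     # fixed single-step rotation '0'->'9', d -> d-1.  Apply that constant pass
--     # key % 10 times to the whole string; non-digits are fixed points of the step.
--     def shift_down_one(s):
--         return "".join("9" if c == "0" else chr(ord(c) - 1) if c.isdigit() else c for c in s)
--     result = encrypted_text
--     for _ in range(key % 10):
--         result = shift_down_one(result)
--     return result
-- ===== Notes on version B (the rewrite author's own statement) =====
-- stated objective: alternative
-- what changed: Instead of computing (digit-key) mod 10 per character in one pass, B iterates a key-independent single-step rotation ('0'->'9', d->d-1) over the whole string key % 10 times, so no modular arithmetic with key happens per character.
import Mathlib
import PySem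

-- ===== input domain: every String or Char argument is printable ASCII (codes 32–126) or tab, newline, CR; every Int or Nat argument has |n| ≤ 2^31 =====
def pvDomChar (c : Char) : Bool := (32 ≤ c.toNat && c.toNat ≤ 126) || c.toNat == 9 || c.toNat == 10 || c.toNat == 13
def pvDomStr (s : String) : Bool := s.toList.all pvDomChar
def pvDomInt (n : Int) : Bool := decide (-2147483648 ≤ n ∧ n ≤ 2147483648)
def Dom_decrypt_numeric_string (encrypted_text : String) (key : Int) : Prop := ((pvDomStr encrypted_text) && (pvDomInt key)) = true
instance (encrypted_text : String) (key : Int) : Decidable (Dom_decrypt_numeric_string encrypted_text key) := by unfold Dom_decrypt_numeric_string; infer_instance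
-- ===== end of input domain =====

-- B replaces A's per-character (digit - key) mod 10 arithmetic by iterating a
-- key-independent single-step digit rotation over the whole string key % 10 times.

-- ===== PORT A =====
-- char.isdigit(): exact on the ASCII domain ('0'..'9')
def pvIsDigit (c : Char) : Bool := decide ('0' ≤ c ∧ c ≤ '9')

def decrypt_numeric_string (encrypted_text : String) (key : Int) : String :=
  let decrypted_chars : List (List Char) :=
    encrypted_text.toList.foldl (fun acc c =>
      if pvIsDigit c then
        -- int(char) = c.toNat - 48 on an ASCII digit; str(d) = PySem.Int.toChars d
        acc ++ [PySem.Int.toChars (PySem.Int.mod (((c.toNat : Int) - 48) - key + 10) 10)]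
      else
        acc ++ [[c]]) []
  String.ofList decrypted_chars.flatten  -- "".join(decrypted_chars)

-- ===== PORT B =====
-- '"9" if c == "0" else chr(ord(c) - 1) if c.isdigit() else c'
def pvStep (c : Char) : Char :=
  if c = '0' then '9'
  else if pvIsDigit c then Char.ofNat (c.toNat - 1)
  else c

-- shift_down_one(s): one whole-string pass of the fixed rotation
def pvShiftDownOne (l : List Char) : List Char := l.map pvStep

def decrypt_numeric_string_alt (encrypted_text : String) (key : Int) : String :=
  -- 'for _ in range(key % 10): result = shift_down_one(result)'
  String.ofList (pvShiftDownOne^[(PySem.Int.mod key 10).toNat] encrypted_text.toList)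

-- ===== PRECONDITION & SPEC =====
def Spec_decrypt_numeric_string (encrypted_text : String) (key : Int) (out : String) : Prop := out = decrypt_numeric_string_alt encrypted_text key
instance (encrypted_text : String) (key : Int) (out : String) : Decidable (Spec_decrypt_numeric_string encrypted_text key out) := by unfold Spec_decrypt_numeric_string; infer_instance

-- ===== CLAIM (what is proved, stated in full; the proofs are below) =====
def Claim_equal_decrypt_numeric_string : Prop := ∀ (encrypted_text : String) (key : Int), Dom_decrypt_numeric_string encrypted_text key → Spec_decrypt_numeric_string encrypted_text key (decrypt_numeric_string encrypted_text key)

-- ===== LEMMAS AND PROOFS =====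

-- flatten of per-character singletons is a plain map
theorem pvFlattenSingleton (f : Char → Char) (l : List Char) :
    (List.map (fun c => [f c]) l).flatten = List.map f l := by
  induction l with
  | nil => rfl
  | cons c l ih => simp [ih]

-- iterating a whole-string pass = mapping the iterated per-character step
theorem pvIterateMap (n : ℕ) (l : List Char) :
    pvShiftDownOne^[n] l = l.map (pvStep^[n]) := by
  induction n generalizing l with
  | zero => simp
  | succ n ih =>
    rw [Function.iterate_succ_apply, ih, pvShiftDownOne, List.map_map,
        Function.iterate_succ]

-- a non-digit is a fixed point of the step, hence of every iterate
theorem pvStepFixed (c : Char) (h : pvIsDigit c = false) (n : ℕ) : pvStep^[n] c = c := by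
  apply Function.iterate_fixed
  have h0 : c ≠ '0' := by rintro rfl; simp [pvIsDigit] at h
  simp [pvStep, h, h0]

-- on the ten digits, m < 10 iterations of the step realise (d - m) mod 10 (A's str result)
theorem pvDigitCases : ∀ m : Fin 10, ∀ d : Fin 10,
    PySem.Int.toChars (PySem.Int.mod (((48 + (d : ℕ) : ℕ) : ℤ) - 48 - (m : ℕ) + 10) 10)
      = [pvStep^[(m : ℕ)] (Char.ofNat (48 + (d : ℕ)))] := by decide

-- per-character agreement of A's branch with B's iterated step
theorem pvPiece (key : Int) (c : Char) :
    (if pvIsDigit c then PySem.Int.toChars (PySem.Int.mod (((c.toNat : Int) - 48) - key + 10) 10)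
     else [c])
    = [pvStep^[(PySem.Int.mod key 10).toNat] c] := by
  by_cases h : pvIsDigit c = true
  · have hb : (48 : ℕ) ≤ c.toNat ∧ c.toNat ≤ 57 := by
      have := of_decide_eq_true h
      exact ⟨this.1, this.2⟩
    set m : ℕ := (PySem.Int.mod key 10).toNat with hm
    have hmod : PySem.Int.mod key 10 = (m : ℤ) := by
      have := PySem.Int.mod_nonneg key (b := 10) (by norm_num)
      omega
    have hm10 : m < 10 := by
      have := PySem.Int.mod_lt key (b := 10) (by norm_num)
      omega
    have hkey : PySem.Int.mod (((c.toNat : Int) - 48) - key + 10) 10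
        = PySem.Int.mod (((c.toNat : Int) - 48) - (m : ℤ) + 10) 10 := by
      rw [PySem.Int.mod_eq_emod_of_pos (show (0:ℤ) < 10 by norm_num),
          PySem.Int.mod_eq_emod_of_pos (show (0:ℤ) < 10 by norm_num)]
      rw [PySem.Int.mod_eq_emod_of_pos (show (0:ℤ) < 10 by norm_num)] at hmod
      omega
    have hc : c = Char.ofNat (48 + (c.toNat - 48)) := by
      rw [Nat.add_sub_cancel' hb.1]; exact (Char.ofNat_toNat c).symm
    have hd : c.toNat - 48 < 10 := by omega
    have key10 := pvDigitCases ⟨m, hm10⟩ ⟨c.toNat - 48, hd⟩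
    rw [← hc] at key10
    simp only [h, if_true, hkey]
    have harith : ((c.toNat : ℤ) - 48 - (m : ℤ) + 10)
        = ((48 + (c.toNat - 48) : ℕ) : ℤ) - 48 - (m : ℤ) + 10 := by omega
    rw [harith]
    exact key10
  · have hf : pvIsDigit c = false := by simpa using h
    simp [hf, pvStepFixed c hf]

-- ===== VERDICT (by name: the statement is the Claim_ definition above) =====
theorem decrypt_numeric_string_spec : Claim_equal_decrypt_numeric_string := by
  intro s key _
  show decrypt_numeric_string s key = decrypt_numeric_string_alt s key
  rw [decrypt_numeric_string, decrypt_numeric_string_alt]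
  have h : (fun (acc : List (List Char)) (c : Char) =>
      if pvIsDigit c then
        acc ++ [PySem.Int.toChars (PySem.Int.mod (((c.toNat : Int) - 48) - key + 10) 10)]
      else acc ++ [[c]])
      = (fun acc c => acc ++ [if pvIsDigit c then
          PySem.Int.toChars (PySem.Int.mod (((c.toNat : Int) - 48) - key + 10) 10) else [c]]) := by
    funext acc c; split <;> rfl
  rw [h, PySem.List.foldl_append_singleton_eq_map, List.nil_append]
  rw [List.map_congr_left (fun c _ => pvPiece key c), pvIterateMap,
      pvFlattenSingleton]
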